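-- pv_equiv track=rewrite | github.com/evertonbrunolima/calculo_numerico | metodo_glass_jacob_matriz.py | separa_matriz
-- ===== SOURCE A (Python) =====
-- def separa_matriz(matriz):
--     I = []
--     D = []
--     S =  []
--     for indicel, l in enumerate(matriz):
--         VD = []
--         VI = []
--         VS = []
--         for indicec, e in enumerate(l):
--             if (indicec == indicel):
--                 VD.append(e)
--                 VI.append(0)
--                 VS.append(0)
--             elif indicec<indicel:
--                 VD.append(0)
--                 VI.append(e)
--                 VS.append(0)
--             else:
--                 VD.append(0)
--                 VI.append(0)
--                 VS.append(e)
--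
--         I.append(VI)
--         D.append(VD)
--         S.append(VS)
--     return I,S, D
-- ===== SOURCE B (Python) =====
-- def separa_matriz(matriz):
--     I = []
--     S = []
--     D = []
--     for i, row in enumerate(matriz):
--         n = len(row)
--         low = row[:i] + [0] * (n - i)
--         diag = [0] * n
--         if i < n:
--             diag[i] = row[i]
--         sup = [e - a - b for e, a, b in zip(row, low, diag)]
--         I.append(low)
--         D.append(diag)
--         S.append(sup)
--     return I, S, D
-- ===== Notes on version B (the rewrite author's own statement) =====
-- stated objective: alternative
-- what changed: Instead of classifying every element with a three-way index comparison, B builds each lower row by slicing the prefix and padding with zeros, the diagonal row by a single indexed write into a zero row, and the upper row by elementwise subtraction row - low - diag.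
import Mathlib
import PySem

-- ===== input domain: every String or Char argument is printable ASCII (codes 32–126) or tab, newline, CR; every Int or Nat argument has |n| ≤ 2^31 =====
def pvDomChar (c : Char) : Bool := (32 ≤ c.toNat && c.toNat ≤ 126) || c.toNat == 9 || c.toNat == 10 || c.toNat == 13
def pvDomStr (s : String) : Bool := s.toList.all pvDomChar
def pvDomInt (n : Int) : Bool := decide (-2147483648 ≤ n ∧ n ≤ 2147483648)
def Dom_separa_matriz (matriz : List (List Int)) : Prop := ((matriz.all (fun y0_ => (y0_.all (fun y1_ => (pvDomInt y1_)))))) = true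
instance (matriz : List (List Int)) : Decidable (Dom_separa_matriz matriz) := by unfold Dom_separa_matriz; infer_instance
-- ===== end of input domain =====

-- B builds each lower row by slicing-and-padding, the diagonal row by one indexed write into a zero row,
-- and the upper row by elementwise subtraction (row - low - diag) — no per-element index comparisons (alternative decomposition, same cost).

-- ===== PORT A =====
def separa_matriz (matriz : List (List Int)) : List (List Int) × List (List Int) × List (List Int) :=
  let r := (PySem.List.enumerate matriz 0).foldl
    (fun (acc : List (List Int) × List (List Int) × List (List Int)) il =>
      let indicel := il.1
      let l := il.2
      let v := (PySem.List.enumerate l 0).foldl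
        (fun (v : List Int × List Int × List Int) ce =>
          let indicec := ce.1
          let e := ce.2
          if indicec == indicel then (v.1 ++ [e], v.2.1 ++ [(0:Int)], v.2.2 ++ [(0:Int)])
          else if indicec < indicel then (v.1 ++ [(0:Int)], v.2.1 ++ [e], v.2.2 ++ [(0:Int)])
          else (v.1 ++ [(0:Int)], v.2.1 ++ [(0:Int)], v.2.2 ++ [e]))
        ([], [], [])
      -- v = (VD, VI, VS); acc = (I, D, S)
      (acc.1 ++ [v.2.1], acc.2.1 ++ [v.1], acc.2.2 ++ [v.2.2]))
    ([], [], [])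
  (r.1, r.2.2, r.2.1)   -- return I, S, D

-- ===== PORT B =====
-- B's per-row pieces: low = row[:i] + [0]*(n-i); diag = [0]*n with diag[i] = row[i] when i < n
-- (the conditional write is ported as an if-expression); sup = [e - a - b for e,a,b in zip(row, low, diag)]
def pvLowRow (i : Int) (row : List Int) : List Int :=
  PySem.List.slice row none (some i) ++ PySem.List.pyRepeat [(0:Int)] ((row.length : Int) - i)

def pvDiagRow (i : Int) (row : List Int) : List Int :=
  if i < (row.length : Int) then
    PySem.List.pySetD (List.replicate row.length (0:Int)) i (PySem.List.pyGetD row i 0)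
  else List.replicate row.length (0:Int)

def pvSupRow (row low diag : List Int) : List Int :=
  (row.zip (low.zip diag)).map (fun t => t.1 - t.2.1 - t.2.2)

def separa_matriz_alt (matriz : List (List Int)) : List (List Int) × List (List Int) × List (List Int) :=
  (PySem.List.enumerate matriz 0).foldl
    (fun (acc : List (List Int) × List (List Int) × List (List Int)) p =>
      let low := pvLowRow p.1 p.2
      let diag := pvDiagRow p.1 p.2
      let sup := pvSupRow p.2 low diag
      (acc.1 ++ [low], acc.2.1 ++ [sup], acc.2.2 ++ [diag]))
    ([], [], [])

-- ===== PRECONDITION & SPEC =====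
def Spec_separa_matriz (matriz : List (List Int)) (out : List (List Int) × List (List Int) × List (List Int)) : Prop := out = separa_matriz_alt matriz
instance (matriz : List (List Int)) (out : List (List Int) × List (List Int) × List (List Int)) : Decidable (Spec_separa_matriz matriz out) := by unfold Spec_separa_matriz; infer_instance

-- ===== CLAIM (what is proved, stated in full; the proofs are below) =====
def Claim_equal_separa_matriz : Prop := ∀ (matriz : List (List Int)), Dom_separa_matriz matriz → Spec_separa_matriz matriz (separa_matriz matriz)

-- ===== LEMMAS AND PROOFS =====

-- the inner loop of A, abstracted
def pvInner (i : Int) (l : List Int) (s : Int) (v : List Int × List Int × List Int) :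
    List Int × List Int × List Int :=
  (PySem.List.enumerate l s).foldl
    (fun (v : List Int × List Int × List Int) ce =>
      if ce.1 == i then (v.1 ++ [ce.2], v.2.1 ++ [(0:Int)], v.2.2 ++ [(0:Int)])
      else if ce.1 < i then (v.1 ++ [(0:Int)], v.2.1 ++ [ce.2], v.2.2 ++ [(0:Int)])
      else (v.1 ++ [(0:Int)], v.2.1 ++ [(0:Int)], v.2.2 ++ [ce.2])) v

lemma pvInner_eq (i : Int) (l : List Int) (s : Int) (vd vi vs : List Int) :
    pvInner i l s (vd, vi, vs) =
      (vd ++ (PySem.List.enumerate l s).map (fun q => if q.1 == i then q.2 else 0),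
       vi ++ (PySem.List.enumerate l s).map (fun q => if q.1 < i then q.2 else 0),
       vs ++ (PySem.List.enumerate l s).map (fun q => if q.1 > i then q.2 else 0)) := by
  induction l generalizing s vd vi vs with
  | nil => simp [pvInner, PySem.List.enumerate_nil]
  | cons x xs ih =>
    simp only [pvInner, PySem.List.enumerate_cons, List.foldl_cons, List.map_cons]
    by_cases h1 : s = i
    · simp [pvInner] at ih
      simp [h1, ih]
    · by_cases h2 : s < i
      · simp [pvInner] at ih
        simp [h1, h2, ih, not_lt_of_gt h2]
      · simp [pvInner] at ih
        simp [h1, h2, ih, (by omega : s > i)]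

-- the outer loop of A, abstracted
def pvOuter (m : List (List Int)) (s : Int)
    (acc : List (List Int) × List (List Int) × List (List Int)) :
    List (List Int) × List (List Int) × List (List Int) :=
  (PySem.List.enumerate m s).foldl
    (fun acc il =>
      let v := pvInner il.1 il.2 0 ([], [], [])
      (acc.1 ++ [v.2.1], acc.2.1 ++ [v.1], acc.2.2 ++ [v.2.2])) acc

lemma pvOuter_eq (m : List (List Int)) (s : Int) (I D S : List (List Int)) :
    pvOuter m s (I, D, S) =
      (I ++ (PySem.List.enumerate m s).map (fun p =>
              (PySem.List.enumerate p.2 0).map (fun q => if q.1 < p.1 then q.2 else 0)),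
       D ++ (PySem.List.enumerate m s).map (fun p =>
              (PySem.List.enumerate p.2 0).map (fun q => if q.1 == p.1 then q.2 else 0)),
       S ++ (PySem.List.enumerate m s).map (fun p =>
              (PySem.List.enumerate p.2 0).map (fun q => if q.1 > p.1 then q.2 else 0))) := by
  induction m generalizing s I D S with
  | nil => simp [pvOuter, PySem.List.enumerate_nil]
  | cons x xs ih =>
    simp only [pvOuter, PySem.List.enumerate_cons, List.foldl_cons, List.map_cons]
    simp only [pvOuter] at ih
    simp only [pvInner_eq, List.nil_append] at ih ⊢
    rw [ih]
    simp

-- entries of a map over enumerate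
lemma pvMapEnum_get (l : List Int) (f : Int → Int → Int) (k : Nat) (hk : k < l.length) :
    ((PySem.List.enumerate l 0).map (fun q => f q.1 q.2))[k]'(by
      simpa [PySem.List.length_enumerate] using hk) = f (k : Int) l[k] := by
  simp [PySem.List.getElem_enumerate]

lemma pvLowRow_eq (i : Int) (hi : 0 ≤ i) (l : List Int) :
    pvLowRow i l = (PySem.List.enumerate l 0).map (fun q => if q.1 < i then q.2 else 0) := by
  obtain ⟨n, rfl⟩ := Int.eq_ofNat_of_zero_le hi
  apply List.ext_getElem
  · simp [pvLowRow, PySem.List.slice_to_natCast, PySem.List.pyRepeat_singleton,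
      PySem.List.length_enumerate]
    omega
  · intro k h1 h2
    have hk : k < l.length := by
      simpa [PySem.List.length_enumerate] using h2
    rw [pvMapEnum_get l (fun a b => if a < (n:Int) then b else 0) k hk]
    simp only [pvLowRow, PySem.List.slice_to_natCast, PySem.List.pyRepeat_singleton]
    by_cases hkn : k < n
    · have hkt : k < (l.take n).length := by simp; omega
      rw [List.getElem_append_left hkt]
      simp [hkn, List.getElem_take]
    · have hkt : (l.take n).length ≤ k := by simp; omega
      rw [List.getElem_append_right hkt]
      simp
      omega

lemma pvDiagRow_eq (i : Int) (hi : 0 ≤ i) (l : List Int) :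
    pvDiagRow i l = (PySem.List.enumerate l 0).map (fun q => if q.1 == i then q.2 else 0) := by
  obtain ⟨n, rfl⟩ := Int.eq_ofNat_of_zero_le hi
  apply List.ext_getElem
  · by_cases h : (n:Int) < l.length <;>
      simp [pvDiagRow, h, PySem.List.length_enumerate]
  · intro k h1 h2
    have hk : k < l.length := by
      simpa [PySem.List.length_enumerate] using h2
    rw [pvMapEnum_get l (fun a b => if a == (n:Int) then b else 0) k hk]
    by_cases h : (n:Int) < l.length
    · have hn : n < l.length := by exact_mod_cast h
      simp only [pvDiagRow, if_pos h, PySem.List.pySetD_natCast]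
      rw [List.getElem_set]
      by_cases hkn : n = k
      · subst hkn
        simp [PySem.List.pyGetD, PySem.List.pyGet?, PySem.List.pyIdx?, hn,
          List.getElem?_eq_getElem hn]
      · simp [hkn]
        exact fun h' => absurd h'.symm hkn
    · have hn : ¬ ((n:Int) < (l.length : Int)) := h
      simp [pvDiagRow, h]
      exact fun h' => absurd (by exact_mod_cast h' ▸ hk : (n:Int) < l.length) hn

lemma pvSupRow_eq (i : Int) (hi : 0 ≤ i) (l : List Int) :
    pvSupRow l (pvLowRow i l) (pvDiagRow i l) =
      (PySem.List.enumerate l 0).map (fun q => if q.1 > i then q.2 else 0) := by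
  rw [pvLowRow_eq i hi l, pvDiagRow_eq i hi l]
  apply List.ext_getElem
  · simp [pvSupRow, PySem.List.length_enumerate]
  · intro k h1 h2
    have hk : k < l.length := by
      simpa [PySem.List.length_enumerate] using h2
    rw [pvMapEnum_get l (fun a b => if a > i then b else 0) k hk]
    simp only [pvSupRow, List.getElem_map, List.getElem_zip,
      PySem.List.getElem_enumerate, zero_add]
    rcases lt_trichotomy ((k:Int)) i with h | h | h
    · simp [h, not_lt_of_gt h]
      intro h'; omega
    · simp [h]
    · simp [not_lt_of_gt h, h]
      intro h'; omega

-- B's outer fold, abstracted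
def pvOuterB (m : List (List Int)) (s : Int)
    (acc : List (List Int) × List (List Int) × List (List Int)) :
    List (List Int) × List (List Int) × List (List Int) :=
  (PySem.List.enumerate m s).foldl
    (fun acc p =>
      (acc.1 ++ [pvLowRow p.1 p.2], acc.2.1 ++ [pvSupRow p.2 (pvLowRow p.1 p.2) (pvDiagRow p.1 p.2)],
       acc.2.2 ++ [pvDiagRow p.1 p.2])) acc

lemma pvOuterB_eq (m : List (List Int)) (s : Int) (hs : 0 ≤ s) (I S D : List (List Int)) :
    pvOuterB m s (I, S, D) =
      (I ++ (PySem.List.enumerate m s).map (fun p =>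
              (PySem.List.enumerate p.2 0).map (fun q => if q.1 < p.1 then q.2 else 0)),
       S ++ (PySem.List.enumerate m s).map (fun p =>
              (PySem.List.enumerate p.2 0).map (fun q => if q.1 > p.1 then q.2 else 0)),
       D ++ (PySem.List.enumerate m s).map (fun p =>
              (PySem.List.enumerate p.2 0).map (fun q => if q.1 == p.1 then q.2 else 0))) := by
  induction m generalizing s I S D with
  | nil => simp [pvOuterB, PySem.List.enumerate_nil]
  | cons x xs ih =>
    simp only [pvOuterB, PySem.List.enumerate_cons, List.foldl_cons, List.map_cons]
    simp only [pvOuterB] at ih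
    rw [ih (s + 1) (by omega)]
    rw [pvSupRow_eq s hs x, pvLowRow_eq s hs x, pvDiagRow_eq s hs x]
    simp

theorem separa_eq (matriz : List (List Int)) :
    separa_matriz matriz = separa_matriz_alt matriz := by
  have hA : separa_matriz matriz =
      (let r := pvOuter matriz 0 ([], [], []); (r.1, r.2.2, r.2.1)) := by
    simp [separa_matriz, pvOuter, pvInner]
  have hB : separa_matriz_alt matriz = pvOuterB matriz 0 ([], [], []) := by
    simp [separa_matriz_alt, pvOuterB]
  rw [hA, hB, pvOuter_eq, pvOuterB_eq matriz 0 le_rfl]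

-- ===== VERDICT (by name: the statement is the Claim_ definition above) =====
theorem separa_matriz_spec : Claim_equal_separa_matriz := by
  intro m _
  unfold Spec_separa_matriz
  exact separa_eq m
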